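-- pv_equiv track=rewrite | github.com/rfongls/Silhouette | api/interop_gen.py | _count_issue_severities
-- ===== SOURCE A (Python) =====
-- from typing import Any, Optional, Dict, List, Set, Tuple
--
-- def _count_issue_severities(rows: list[dict[str, Any]]) -> dict[str, int]:
--     counts = {"ok": 0, "warnings": 0, "errors": 0}
--     for row in rows:
--         sev = (row.get("severity") or "").lower()
--         if sev == "ok":
--             counts["ok"] += 1
--         elif sev == "warning":
--             counts["warnings"] += 1
--         elif sev == "error":
--             counts["errors"] += 1
--     return counts
-- ===== SOURCE B (Python) =====
-- def _count_issue_severities(rows):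
--     sevs = [(row.get("severity") or "").lower() for row in rows]
--     return {label: sevs.count(sev)
--             for label, sev in [("ok", "ok"), ("warnings", "warning"), ("errors", "error")]}
-- ===== Notes on version B (the rewrite author's own statement) =====
-- stated objective: alternative
-- what changed: Replaces A's single accumulating pass with if/elif branch dispatch into three fixed counters by a staged normalize-then-count shape: first materialize the list of normalized severities, then build the result by counting each of the three keys with list.count over that list (no branches, no mutable accumulators).
import Mathlib
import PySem

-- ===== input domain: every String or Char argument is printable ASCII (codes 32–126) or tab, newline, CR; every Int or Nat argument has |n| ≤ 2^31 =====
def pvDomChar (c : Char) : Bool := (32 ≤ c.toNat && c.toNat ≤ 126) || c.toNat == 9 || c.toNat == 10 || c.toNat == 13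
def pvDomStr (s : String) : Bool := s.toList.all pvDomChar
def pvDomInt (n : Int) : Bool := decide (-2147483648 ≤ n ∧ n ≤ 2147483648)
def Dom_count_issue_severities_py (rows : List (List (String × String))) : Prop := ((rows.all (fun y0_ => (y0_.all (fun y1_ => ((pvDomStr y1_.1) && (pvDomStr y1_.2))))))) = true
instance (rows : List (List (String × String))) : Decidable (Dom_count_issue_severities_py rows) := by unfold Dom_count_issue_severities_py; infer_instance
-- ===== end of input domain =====

-- B replaces A's single accumulating pass (if/elif into three counters) by staged passes:
-- normalize all severities into a list, then count each of the three keys in it (alternative).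

-- ===== PORT A =====
-- (row.get("severity") or "") is exact as get?.getD "" here: the only falsy String is "".
def pvSevA (row : List (String × String)) : String :=
  PySem.Str.lower (((PySem.Dict.mk row).get? "severity").getD "")

def count_issue_severities_py (rows : List (List (String × String))) : List (String × Int) :=
  (rows.foldl (fun counts row =>
      let sev := pvSevA row
      if sev = "ok" then counts.insert "ok" (counts.getD "ok" 0 + 1)
      else if sev = "warning" then counts.insert "warnings" (counts.getD "warnings" 0 + 1)
      else if sev = "error" then counts.insert "errors" (counts.getD "errors" 0 + 1)
      else counts)
    (PySem.Dict.mk [("ok", (0 : Int)), ("warnings", 0), ("errors", 0)])).items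

-- ===== PORT B =====
def count_issue_severities_py_alt (rows : List (List (String × String))) : List (String × Int) :=
  let sevs := rows.map (fun row => PySem.Str.lower (((PySem.Dict.mk row).get? "severity").getD ""))
  ([("ok", "ok"), ("warnings", "warning"), ("errors", "error")]).map
    (fun p => (p.1, PySem.List.count sevs p.2))

-- ===== PRECONDITION & SPEC =====
def Spec_count_issue_severities_py (rows : List (List (String × String))) (out : List (String × Int)) : Prop := out = count_issue_severities_py_alt rows
instance (rows : List (List (String × String))) (out : List (String × Int)) : Decidable (Spec_count_issue_severities_py rows out) := by unfold Spec_count_issue_severities_py; infer_instance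

-- ===== CLAIM (what is proved, stated in full; the proofs are below) =====
def Claim_equal_count_issue_severities_py : Prop := ∀ (rows : List (List (String × String))), Dom_count_issue_severities_py rows → Spec_count_issue_severities_py rows (count_issue_severities_py rows)

-- ===== LEMMAS AND PROOFS =====

-- A's loop over the literal three-key dict, with symbolic counts, adds the occurrence counts
-- of "ok"/"warning"/"error" among the normalized severities.
theorem pv_loopA (rows : List (List (String × String))) (a b c : Int) :
    rows.foldl (fun counts row =>
      let sev := pvSevA row
      if sev = "ok" then counts.insert "ok" (counts.getD "ok" 0 + 1)
      else if sev = "warning" then counts.insert "warnings" (counts.getD "warnings" 0 + 1)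
      else if sev = "error" then counts.insert "errors" (counts.getD "errors" 0 + 1)
      else counts)
      (PySem.Dict.mk [("ok", a), ("warnings", b), ("errors", c)])
    = PySem.Dict.mk [("ok", a + (rows.map pvSevA).count "ok"),
        ("warnings", b + (rows.map pvSevA).count "warning"),
        ("errors", c + (rows.map pvSevA).count "error")] := by
  induction rows generalizing a b c with
  | nil => simp
  | cons r rs ih =>
    simp only [List.foldl_cons, List.map_cons]
    by_cases h1 : pvSevA r = "ok"
    · rw [if_pos h1]
      have : (PySem.Dict.mk [("ok", a), ("warnings", b), ("errors", c)]).insert "ok"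
          ((PySem.Dict.mk [("ok", a), ("warnings", b), ("errors", c)]).getD "ok" 0 + 1)
          = PySem.Dict.mk [("ok", a + 1), ("warnings", b), ("errors", c)] := by
        simp [PySem.Dict.insert, PySem.Dict.getD, PySem.Dict.get?, PySem.Dict.contains]
      rw [this, ih]
      simp [h1]
      omega
    · by_cases h2 : pvSevA r = "warning"
      · rw [if_neg h1, if_pos h2]
        have : (PySem.Dict.mk [("ok", a), ("warnings", b), ("errors", c)]).insert "warnings"
            ((PySem.Dict.mk [("ok", a), ("warnings", b), ("errors", c)]).getD "warnings" 0 + 1)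
            = PySem.Dict.mk [("ok", a), ("warnings", b + 1), ("errors", c)] := by
          simp [PySem.Dict.insert, PySem.Dict.getD, PySem.Dict.get?, PySem.Dict.contains]
        rw [this, ih]
        simp [h2]
        omega
      · by_cases h3 : pvSevA r = "error"
        · rw [if_neg h1, if_neg h2, if_pos h3]
          have : (PySem.Dict.mk [("ok", a), ("warnings", b), ("errors", c)]).insert "errors"
              ((PySem.Dict.mk [("ok", a), ("warnings", b), ("errors", c)]).getD "errors" 0 + 1)
              = PySem.Dict.mk [("ok", a), ("warnings", b), ("errors", c + 1)] := by
            simp [PySem.Dict.insert, PySem.Dict.getD, PySem.Dict.get?, PySem.Dict.contains]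
          rw [this, ih]
          simp [h3]
          omega
        · rw [if_neg h1, if_neg h2, if_neg h3, ih]
          simp [h1, h2, h3]

-- ===== VERDICT (by name: the statement is the Claim_ definition above) =====
theorem count_issue_severities_py_spec : Claim_equal_count_issue_severities_py := by
  intro rows _
  unfold Spec_count_issue_severities_py count_issue_severities_py count_issue_severities_py_alt
  rw [pv_loopA]
  have hf : (fun row : List (String × String) =>
      PySem.Str.lower (((PySem.Dict.mk row).get? "severity").getD "")) = pvSevA := rfl
  rw [hf]
  simp [PySem.List.count_eq]
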